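-- pv_equiv track=rewrite | github.com/Jake1025/dungeon-masters-companion | MoveTool_BasicMCP/tests/test_mcp_e2e.py | _bfs_find_any_reachable_pair
-- ===== SOURCE A (Python) =====
-- from collections import deque
-- from typing import Dict, List, Tuple, Optional
--
-- def _bfs_find_any_reachable_pair(edges: Dict[str, List[str]]) -> Optional[Tuple[str, str, List[str]]]:
--     """
--     中文：
--       从真实图中找任意一对“不同节点且可达”的 (start, goal, path)。
--       若图只有孤立点，返回 None。
--
--     English:
--       Find any reachable pair (start != goal) with a BFS path.
--       Return None if graph is totally disconnected.
--     """
--     all_nodes = list(edges.keys())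
--     if len(all_nodes) < 2:
--         return None
--
--     # Try BFS from each node until we find a different reachable goal.
--     for start in all_nodes:
--         # BFS tree
--         q = deque([start])
--         parent = {start: None}
--
--         while q:
--             cur = q.popleft()
--             for nxt in edges.get(cur, []):
--                 if nxt not in parent:
--                     parent[nxt] = cur
--                     q.append(nxt)
--
--         # pick any goal reachable != start
--         for goal in parent.keys():
--             if goal != start:
--                 # reconstruct path
--                 path = []
--                 p = goal
--                 while p is not None:
--                     path.append(p)
--                     p = parent[p]
--                 path.reverse()
--                 return start, goal, path
--
--     return None
-- ===== SOURCE B (Python) =====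
-- def _bfs_find_any_reachable_pair(edges):
--     """One pass: the first key whose adjacency list holds a node different from
--     itself gives the pair; the BFS path is then just [start, neighbor]."""
--     if len(edges) < 2:
--         return None
--     for start, nbrs in edges.items():
--         for nxt in nbrs:
--             if nxt != start:
--                 return start, nxt, [start, nxt]
--     return None
-- ===== Notes on version B (the rewrite author's own statement) =====
-- stated objective: simpler
-- what changed: Replaced the per-start full BFS plus parent-dict scan and path reconstruction by a single pass over the items: the first key with a neighbor different from itself yields (start, neighbor, [start, neighbor]), since A's first goal is always the first BFS-discovered node, i.e. start's first distinct neighbor.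
import Mathlib
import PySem

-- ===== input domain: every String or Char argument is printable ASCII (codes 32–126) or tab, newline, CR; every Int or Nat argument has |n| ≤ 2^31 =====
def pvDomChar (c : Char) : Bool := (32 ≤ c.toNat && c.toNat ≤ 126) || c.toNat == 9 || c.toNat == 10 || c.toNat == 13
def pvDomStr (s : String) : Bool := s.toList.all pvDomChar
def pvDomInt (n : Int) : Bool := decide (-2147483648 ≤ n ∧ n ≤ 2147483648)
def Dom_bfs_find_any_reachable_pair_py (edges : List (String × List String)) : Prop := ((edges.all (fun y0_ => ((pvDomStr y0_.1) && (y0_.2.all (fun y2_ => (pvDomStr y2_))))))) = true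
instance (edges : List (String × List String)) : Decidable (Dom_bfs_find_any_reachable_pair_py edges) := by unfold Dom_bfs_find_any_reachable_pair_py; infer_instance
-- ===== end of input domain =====

-- B replaces A's per-start full BFS (plus parent-dict scan and path reconstruction) by one
-- pass over the items: the first key with a neighbor different from itself yields
-- (start, neighbor, [start, neighbor]) — the same value A returns, computed far more simply.

-- ===== PORT A =====
-- inner 'for nxt in edges.get(cur, [])' body of the BFS while-loop; state = (queue, parent)
def pvBfsInner (cur : String)
    (st : List String × PySem.Dict String (Option String)) (nxt : String) :
    List String × PySem.Dict String (Option String) :=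
  if st.2.contains nxt then st else (st.1 ++ [nxt], st.2.insert nxt (some cur))

-- the 'while q:' loop.  Fuel makes it total: each iteration pops one queue element and
-- every node is appended at most once (guarded by 'nxt not in parent'), so the number of
-- iterations is at most 1 + Σ|adjacency lists|; the fuel supplied below is that bound.
def pvBfsLoop (d : PySem.Dict String (List String)) :
    Nat → List String → PySem.Dict String (Option String) → PySem.Dict String (Option String)
  | 0, _, parent => parent
  | fuel+1, q, parent =>
    match q with
    | [] => parent
    | cur :: qrest =>
      let st := (d.getD cur []).foldl (pvBfsInner cur) (qrest, parent)
      pvBfsLoop d fuel st.1 st.2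

-- 'for goal in parent.keys(): if goal != start: …' — the first key different from start
def pvGoalScan (start : String) : List String → Option String
  | [] => none
  | g :: gs => if g ≠ start then some g else pvGoalScan start gs

-- 'while p is not None: path.append(p); p = parent[p]'.  Fuel = parent.size + 1 suffices
-- (the parent pointers form a tree); the 'none' branch on get? is Python's KeyError,
-- unreachable for parents built by the BFS.
def pvPathLoop (parent : PySem.Dict String (Option String)) :
    Nat → Option String → List String → List String
  | 0, _, path => path
  | fuel+1, p?, path =>
    match p? with
    | none => path
    | some p =>
      match parent.get? p with
      | none => path
      | some pp => pvPathLoop parent fuel pp (path ++ [p])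

-- one iteration of 'for start in all_nodes': BFS, goal pick, path reconstruction
def pvTryStart (d : PySem.Dict String (List String)) (start : String) :
    Option (String × String × List String) :=
  let parent := pvBfsLoop d ((d.values.map List.length).sum + 1) [start]
      (PySem.Dict.empty.insert start none)
  match pvGoalScan start parent.keys with
  | none => none
  | some goal =>
    let path := pvPathLoop parent (parent.size + 1) (some goal) []
    some (start, goal, path.reverse)

def pvStartsLoop (d : PySem.Dict String (List String)) :
    List String → Option (String × String × List String)
  | [] => none
  | s :: rest =>
    match pvTryStart d s with
    | some r => some r
    | none => pvStartsLoop d rest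

def bfs_find_any_reachable_pair_py (edges : List (String × List String)) :
    Option (String × String × List String) :=
  let d := PySem.Dict.ofList edges
  let all_nodes := d.keys
  if all_nodes.length < 2 then none
  else pvStartsLoop d all_nodes

-- ===== PORT B =====
-- 'for nxt in nbrs: if nxt != start: …' — first neighbor different from start
def pvFirstNe (start : String) : List String → Option String
  | [] => none
  | n :: rest => if n ≠ start then some n else pvFirstNe start rest

-- 'for start, nbrs in edges.items(): …'
def pvAltScan : List (String × List String) → Option (String × String × List String)
  | [] => none
  | (s, ns) :: rest =>
    match pvFirstNe s ns with
    | some n => some (s, n, [s, n])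
    | none => pvAltScan rest

def bfs_find_any_reachable_pair_py_alt (edges : List (String × List String)) :
    Option (String × String × List String) :=
  let d := PySem.Dict.ofList edges
  if d.size < 2 then none
  else pvAltScan d.items

-- ===== PRECONDITION & SPEC =====
def Spec_bfs_find_any_reachable_pair_py (edges : List (String × List String)) (out : Option (String × String × List String)) : Prop := out = bfs_find_any_reachable_pair_py_alt edges
instance (edges : List (String × List String)) (out : Option (String × String × List String)) : Decidable (Spec_bfs_find_any_reachable_pair_py edges out) := by unfold Spec_bfs_find_any_reachable_pair_py; infer_instance

-- ===== CLAIM (what is proved, stated in full; the proofs are below) =====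
def Claim_equal_bfs_find_any_reachable_pair_py : Prop := ∀ (edges : List (String × List String)), Dom_bfs_find_any_reachable_pair_py edges → Spec_bfs_find_any_reachable_pair_py edges (bfs_find_any_reachable_pair_py edges)

-- ===== LEMMAS AND PROOFS =====

-- the inner neighbor fold only appends fresh keys to parent and keeps keys Nodup
theorem pvFoldGrow (cur : String) (ns : List String) :
    ∀ (q : List String) (p : PySem.Dict String (Option String)), p.keys.Nodup →
      ∃ t, (ns.foldl (pvBfsInner cur) (q, p)).2.items = p.items ++ t ∧
        (ns.foldl (pvBfsInner cur) (q, p)).2.keys.Nodup := by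
  induction ns with
  | nil => intro q p hnd; exact ⟨[], by simp, hnd⟩
  | cons n ns ih =>
    intro q p hnd
    simp only [List.foldl_cons, pvBfsInner]
    by_cases hc : p.contains n = true
    · simp only [hc, reduceIte]
      exact ih q p hnd
    · have hc' : p.contains n = false := by simpa using hc
      simp only [hc', Bool.false_eq_true, reduceIte]
      obtain ⟨t, ht, hnd'⟩ := ih (q ++ [n]) (p.insert n (some cur))
        (PySem.Dict.nodup_keys_insert p n (some cur) hnd)
      refine ⟨(n, some cur) :: t, ?_, hnd'⟩
      rw [ht, PySem.Dict.items_insert_of_not_contains p (some cur) hc']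
      simp

-- the BFS while-loop only appends fresh keys to parent and keeps keys Nodup
theorem pvBfsGrow (d : PySem.Dict String (List String)) :
    ∀ (fuel : Nat) (q : List String) (p : PySem.Dict String (Option String)), p.keys.Nodup →
      ∃ t, (pvBfsLoop d fuel q p).items = p.items ++ t ∧ (pvBfsLoop d fuel q p).keys.Nodup := by
  intro fuel
  induction fuel with
  | zero => intro q p hnd; exact ⟨[], by simp [pvBfsLoop], by simpa [pvBfsLoop] using hnd⟩
  | succ fuel ih =>
    intro q p hnd
    match q with
    | [] => exact ⟨[], by simp [pvBfsLoop], by simpa [pvBfsLoop] using hnd⟩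
    | cur :: qrest =>
      simp only [pvBfsLoop]
      obtain ⟨t1, ht1, hnd1⟩ := pvFoldGrow cur (d.getD cur []) qrest p hnd
      obtain ⟨t2, ht2, hnd2⟩ := ih _ _ hnd1
      exact ⟨t1 ++ t2, by rw [ht2, ht1, List.append_assoc], hnd2⟩

theorem pvBfsLoop_nil (d : PySem.Dict String (List String)) (fuel : Nat)
    (p : PySem.Dict String (Option String)) : pvBfsLoop d fuel [] p = p := by
  cases fuel <;> rfl

-- if every neighbor equals start, the fold leaves the state untouched
theorem pvFoldAllSelf (s : String) (ns : List String) (h : pvFirstNe s ns = none) :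
    ∀ (q : List String) (p : PySem.Dict String (Option String)), p.contains s = true →
      ns.foldl (pvBfsInner s) (q, p) = (q, p) := by
  induction ns with
  | nil => intro q p _; rfl
  | cons n ns ih =>
    intro q p hc
    simp only [pvFirstNe] at h
    by_cases hn : n = s
    · subst hn
      simp only [ne_eq, not_true_eq_false, reduceIte] at h
      simp only [List.foldl_cons, pvBfsInner, hc, reduceIte]
      exact ih h q p hc
    · simp [hn] at h
  
-- first distinct neighbor g: after the fold, parent starts with (s,none),(g,some s)
theorem pvFoldFirst (s g : String) (ns : List String) (h : pvFirstNe s ns = some g) :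
    ∃ q t, ns.foldl (pvBfsInner s) ([], PySem.Dict.empty.insert s none) =
        (q, PySem.Dict.mk ((s, none) :: (g, some s) :: t)) ∧
      (PySem.Dict.mk ((s, (none : Option String)) :: (g, some s) :: t)).keys.Nodup := by
  induction ns with
  | nil => simp [pvFirstNe] at h
  | cons n ns ih =>
    simp only [pvFirstNe] at h
    by_cases hn : n = s
    · subst hn
      simp only [ne_eq, not_true_eq_false, reduceIte] at h
      obtain ⟨q, t, heq, hnd⟩ := ih h
      refine ⟨q, t, ?_, hnd⟩
      have hc : (PySem.Dict.empty.insert n (none : Option String)).contains n = true :=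
        PySem.Dict.contains_insert_self _ n none
      simpa [pvBfsInner, hc] using heq
    · rw [if_pos hn] at h
      obtain rfl : n = g := by simpa using h
      have hc : (PySem.Dict.empty.insert s (none : Option String)).contains n = false := by
        simp [PySem.Dict.contains_insert, PySem.Dict.contains_empty]
        exact fun hgs => (hn hgs).elim
      have hstep : pvBfsInner s ([], PySem.Dict.empty.insert s none) n =
          ([n], (PySem.Dict.empty.insert s none).insert n (some s)) := by
        simp [pvBfsInner, hc]
      have hnd0 : ((PySem.Dict.empty.insert s (none : Option String)).insert n
          (some s)).keys.Nodup := by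
        apply PySem.Dict.nodup_keys_insert
        apply PySem.Dict.nodup_keys_insert
        simp
      obtain ⟨t, ht, hnd⟩ := pvFoldGrow s ns [n]
        ((PySem.Dict.empty.insert s none).insert n (some s)) hnd0
      have hitems : ((PySem.Dict.empty.insert s (none : Option String)).insert n
          (some s)).items = [(s, none), (n, some s)] := by
        rw [PySem.Dict.items_insert_of_not_contains _ (some s) hc]; rfl
      have hdict : (ns.foldl (pvBfsInner s) ([n],
          (PySem.Dict.empty.insert s none).insert n (some s))).2 =
          PySem.Dict.mk ((s, none) :: (n, some s) :: t) := by
        apply PySem.Dict.ext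
        rw [ht, hitems]; rfl
      refine ⟨(ns.foldl (pvBfsInner s) ([n],
          (PySem.Dict.empty.insert s none).insert n (some s))).1, t, ?_, ?_⟩
      · rw [List.foldl_cons, hstep, ← hdict]
      · rw [← hdict]; exact hnd

-- one outer-loop iteration of A collapses to B's inner scan of s's adjacency list
theorem pvTryStart_eq (d : PySem.Dict String (List String)) (s : String) :
    pvTryStart d s = match pvFirstNe s (d.getD s []) with
      | some n => some (s, n, [s, n])
      | none => none := by
  unfold pvTryStart
  have hfuel : (d.values.map List.length).sum + 1 = Nat.succ ((d.values.map List.length).sum) := rfl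
  rw [hfuel]
  simp only [pvBfsLoop]
  cases hfn : pvFirstNe s (d.getD s []) with
  | none =>
    have hc : (PySem.Dict.empty.insert s (none : Option String)).contains s = true :=
      PySem.Dict.contains_insert_self _ s none
    rw [pvFoldAllSelf s (d.getD s []) hfn [] _ hc]
    rw [pvBfsLoop_nil]
    have hkeys : (PySem.Dict.empty.insert s (none : Option String)).keys = [s] := rfl
    simp [hkeys, pvGoalScan]
  | some g =>
    obtain ⟨q, t, heq, hnd⟩ := pvFoldFirst s g (d.getD s []) hfn
    rw [heq]
    obtain ⟨t2, hitems, hnd2⟩ := pvBfsGrow d ((d.values.map List.length).sum) q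
      (PySem.Dict.mk ((s, none) :: (g, some s) :: t)) hnd
    set P := pvBfsLoop d ((d.values.map List.length).sum) q
      (PySem.Dict.mk ((s, none) :: (g, some s) :: t)) with hP
    have hitems' : P.items = (s, none) :: (g, some s) :: (t ++ t2) := by
      rw [hitems]; rfl
    have hgs : g ≠ s := by
      have hnd' := hnd2
      rw [show P.keys = P.items.map (·.1) from rfl, hitems'] at hnd'
      simp only [List.map_cons, List.nodup_cons, List.mem_cons, List.mem_map] at hnd'
      exact fun h => hnd'.1 (Or.inl h.symm)
    have hkeys : P.keys = s :: g :: (t ++ t2).map (·.1) := by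
      rw [show P.keys = P.items.map (·.1) from rfl, hitems']; rfl
    have hscan : pvGoalScan s P.keys = some g := by
      rw [hkeys]; simp [pvGoalScan, hgs]
    rw [hscan]
    have hget_g : P.get? g = some (some s) :=
      PySem.Dict.get?_of_mem_items P (by rw [hitems']; simp) hnd2
    have hget_s : P.get? s = some none :=
      PySem.Dict.get?_of_mem_items P (by rw [hitems']; simp) hnd2
    have hsize : P.size = (t ++ t2).length + 2 := by
      rw [show P.size = P.items.length from rfl, hitems']; simp
    have hpath : pvPathLoop P (P.size + 1) (some g) [] = [g, s] := by
      rw [hsize]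
      simp [pvPathLoop, hget_g, hget_s]
    show some (s, g, (pvPathLoop P (P.size + 1) (some g) []).reverse) = some (s, g, [s, g])
    rw [hpath]
    rfl

-- A's loop over keys equals B's scan of the items, given lookups agree with the items
theorem pvLoops_eq (d : PySem.Dict String (List String)) :
    ∀ (l : List (String × List String)), (∀ p ∈ l, d.getD p.1 [] = p.2) →
      pvStartsLoop d (l.map (·.1)) = pvAltScan l := by
  intro l
  induction l with
  | nil => intro _; rfl
  | cons p rest ih =>
    intro h
    obtain ⟨s, ns⟩ := p
    have hs : d.getD s [] = ns := h (s, ns) (by simp)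
    simp only [List.map_cons, pvStartsLoop, pvAltScan, pvTryStart_eq, hs]
    cases pvFirstNe s ns with
    | none => exact ih fun p hp => h p (by simp [hp])
    | some n => rfl

-- ===== VERDICT (by name: the statement is the Claim_ definition above) =====
theorem bfs_find_any_reachable_pair_py_spec : Claim_equal_bfs_find_any_reachable_pair_py := by
  intro edges _
  unfold Spec_bfs_find_any_reachable_pair_py
  show (if (PySem.Dict.ofList edges).keys.length < 2 then none
        else pvStartsLoop (PySem.Dict.ofList edges) (PySem.Dict.ofList edges).keys)
      = (if (PySem.Dict.ofList edges).size < 2 then none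
        else pvAltScan (PySem.Dict.ofList edges).items)
  have hlen : (PySem.Dict.ofList edges).keys.length = (PySem.Dict.ofList edges).size := by
    rw [show (PySem.Dict.ofList edges).keys
        = (PySem.Dict.ofList edges).items.map (·.1) from rfl]
    simp; rfl
  rw [hlen]
  by_cases hsz : (PySem.Dict.ofList edges).size < 2
  · simp [hsz]
  · simp only [hsz, reduceIte]
    rw [show (PySem.Dict.ofList edges).keys
        = (PySem.Dict.ofList edges).items.map (·.1) from rfl]
    exact pvLoops_eq (PySem.Dict.ofList edges) (PySem.Dict.ofList edges).items
      (fun p hp => PySem.Dict.getD_of_mem_items (PySem.Dict.ofList edges) hp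
        (PySem.Dict.nodup_keys_ofList edges) [])
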